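-- pv_equiv track=rewrite | github.com/Yeop-Dong/CodingTest_Study | 프로그래머스/3/77886. 110 옮기기/110 옮기기.py | solution
-- ===== SOURCE A (Python) =====
-- def solution(s):
--     answer = []
--     for x in s:
--         cnt = 0
--         c110 = 0
--         result = ""
--         for c in x:
--             if c == '1':
--                 cnt += 1
--             elif cnt > 1:
--                 cnt -= 2
--                 c110 += 1
--             else:
--                 result += "1" * cnt + "0"
--                 cnt = 0
--         result += "110" * c110 + "1" * cnt
--         answer.append(result)
--
--
--     return answer
-- ===== SOURCE B (Python) =====
-- def solution(s):
--     answer = []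
--     for x in s:
--         # A treats every non-'1' character as '0'; we do the same.
--         stack = []
--         c110 = 0
--         for c in x:
--             stack.append('1' if c == '1' else '0')
--             if stack[-3:] == ['1', '1', '0']:
--                 del stack[-3:]
--                 c110 += 1
--         reduced = ''.join(stack)
--         t = len(reduced) - len(reduced.rstrip('1'))
--         answer.append(reduced[:len(reduced) - t] + '110' * c110 + '1' * t)
--     return answer
-- ===== Notes on version B (the rewrite author's own statement) =====
-- stated objective: idiomatic
-- what changed: Replaces A's running-counter simulation (pending-ones counter with inline flushes) by an explicit stack that cancels '110' suffixes, followed by a separate reconstruction pass that reinserts the collected '110' blocks before the trailing run of '1's.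
import Mathlib
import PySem

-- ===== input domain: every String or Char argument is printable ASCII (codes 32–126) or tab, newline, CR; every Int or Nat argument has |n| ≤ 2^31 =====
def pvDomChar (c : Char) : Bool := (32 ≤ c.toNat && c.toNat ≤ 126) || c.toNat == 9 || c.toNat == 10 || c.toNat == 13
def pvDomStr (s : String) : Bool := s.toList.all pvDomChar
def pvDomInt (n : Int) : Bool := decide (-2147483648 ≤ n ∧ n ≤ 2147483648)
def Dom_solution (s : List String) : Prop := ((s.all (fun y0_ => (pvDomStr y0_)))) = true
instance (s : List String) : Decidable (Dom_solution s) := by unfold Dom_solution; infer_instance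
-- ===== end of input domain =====

-- B replaces A's counter simulation by an explicit '110'-cancelling stack plus a
-- reconstruction pass (same cost, more idiomatic).

-- ===== PORT A =====
-- inner-loop body of A, state (cnt, c110, result)
def pvA_step (st : Nat × Nat × List Char) (c : Char) : Nat × Nat × List Char :=
  let (cnt, c110, result) := st
  if c = '1' then (cnt + 1, c110, result)
  else if cnt > 1 then (cnt - 2, c110 + 1, result)
  else (0, c110, result ++ List.replicate cnt '1' ++ ['0'])

def pvA_one (x : String) : String :=
  let (cnt, c110, result) := x.toList.foldl pvA_step (0, 0, [])
  String.mk (result ++ (List.replicate c110 ['1', '1', '0']).flatten ++ List.replicate cnt '1')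

def solution (s : List String) : List String := s.map pvA_one

-- ===== PORT B =====
-- inner-loop body of B, state (c110, stack); stack[-3:] == ['1','1','0'] is
-- drop (length - 3), del stack[-3:] is take (length - 3) (exact for Python here)
def pvB_step (st : Nat × List Char) (c : Char) : Nat × List Char :=
  let (c110, stack) := st
  let stack' := stack ++ [if c = '1' then '1' else '0']
  if stack'.drop (stack'.length - 3) = ['1', '1', '0'] then
    (c110 + 1, stack'.take (stack'.length - 3))
  else (c110, stack')

-- rstrip('1') ported by hand (exact): remove the trailing run of '1's
def pvB_rstrip1 (l : List Char) : List Char := (l.reverse.dropWhile (· = '1')).reverse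

def pvB_one (x : String) : String :=
  let (c110, stack) := x.toList.foldl pvB_step (0, [])
  let reduced := stack
  let t := reduced.length - (pvB_rstrip1 reduced).length
  String.mk (reduced.take (reduced.length - t) ++ (List.replicate c110 ['1', '1', '0']).flatten ++ List.replicate t '1')

def solution_alt (s : List String) : List String := s.map pvB_one

-- ===== PRECONDITION & SPEC =====
def Spec_solution (s : List String) (out : List String) : Prop := out = solution_alt s
instance (s : List String) (out : List String) : Decidable (Spec_solution s out) := by unfold Spec_solution; infer_instance

-- ===== CLAIM (what is proved, stated in full; the proofs are below) =====
def Claim_equal_solution : Prop := ∀ (s : List String), Dom_solution s → Spec_solution s (solution s)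

-- ===== LEMMAS AND PROOFS =====

-- A's flushed result is empty or ends in '0'
def pvEnds0 (f : List Char) : Prop := f = [] ∨ ∃ g, f = g ++ ['0']

theorem pv_cond_imp (l : List Char) (h : l.drop (l.length - 3) = ['1', '1', '0']) :
    ∃ u, l = u ++ ['1', '1', '0'] := by
  refine ⟨l.take (l.length - 3), ?_⟩
  conv_lhs => rw [← List.take_append_drop (l.length - 3) l]
  rw [h]

theorem pv_step_inv (f : List Char) (cnt c110 : Nat) (ch : Char) (hf : pvEnds0 f) :
    pvB_step (c110, f ++ List.replicate cnt '1') ch =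
      ((pvA_step (cnt, c110, f) ch).2.1,
        (pvA_step (cnt, c110, f) ch).2.2 ++ List.replicate (pvA_step (cnt, c110, f) ch).1 '1')
    ∧ pvEnds0 (pvA_step (cnt, c110, f) ch).2.2 := by
  by_cases h1 : ch = '1'
  · -- push a '1'; no '110' suffix possible
    have hne : (f ++ List.replicate cnt '1' ++ ['1']).drop
        ((f ++ List.replicate cnt '1' ++ ['1']).length - 3) ≠ ['1', '1', '0'] := by
      intro h
      obtain ⟨u, hu⟩ := pv_cond_imp _ h
      have := congrArg List.getLast? hu
      simp [List.append_assoc] at this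
    simp only [pvA_step, pvB_step, h1, if_true]
    constructor
    · rw [if_neg hne]
      simp [List.replicate_succ', List.append_assoc]
    · exact hf
  · by_cases h2 : cnt > 1
    · -- cancel a '110'
      obtain ⟨m, hm⟩ : ∃ m, cnt = m + 2 := ⟨cnt - 2, by omega⟩
      have hdec : f ++ List.replicate cnt '1' ++ [('0' : Char)] =
          (f ++ List.replicate m '1') ++ ['1', '1', '0'] := by
        subst hm
        simp [List.replicate_add, List.append_assoc]
      simp only [pvA_step, pvB_step, if_neg h1, if_pos h2]
      constructor
      · have hlen : ((f ++ List.replicate m '1') ++ ['1', '1', '0']).length - 3 =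
            (f ++ List.replicate m '1').length := by simp; omega
        rw [hdec, if_pos (by rw [hlen]; simp)]
        rw [hlen, List.take_left]
        have : cnt - 2 = m := by omega
        simp [this]
      · exact hf
    · -- flush: cnt ≤ 1, pushed char is '0', no cancellation
      have hcnt : cnt = 0 ∨ cnt = 1 := by omega
      have hne : (f ++ List.replicate cnt '1' ++ ['0']).drop
          ((f ++ List.replicate cnt '1' ++ ['0']).length - 3) ≠ ['1', '1', '0'] := by
        intro h
        obtain ⟨u, hu⟩ := pv_cond_imp _ h
        rcases hf with hf | ⟨g, hg⟩
        · rcases hcnt with hc | hc <;> subst hc <;>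
          · subst hf
            have := congrArg List.length hu
            simp at this
        · subst hg
          rcases hcnt with hc | hc <;> subst hc
          · -- g ++ ['0','0'] = (u ++ ['1']) ++ ['1','0']
            have hu' : g ++ ['0', '0'] = (u ++ ['1']) ++ ['1', '0'] := by
              simpa [List.append_assoc] using hu
            have := (List.append_inj' hu' (by simp)).2
            simp at this
          · -- g ++ ['0','1','0'] = u ++ ['1','1','0']
            have hu' : g ++ ['0', '1', '0'] = u ++ ['1', '1', '0'] := by
              simpa [List.append_assoc] using hu
            have := (List.append_inj' hu' (by simp)).2
            simp at this
      simp only [pvA_step, pvB_step, if_neg h1, if_neg h2]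
      constructor
      · rw [if_neg hne]
        simp [List.append_assoc]
      · exact Or.inr ⟨f ++ List.replicate cnt '1', by simp [List.append_assoc]⟩

theorem pv_fold_inv (l : List Char) : ∀ (f : List Char) (cnt c110 : Nat), pvEnds0 f →
    l.foldl pvB_step (c110, f ++ List.replicate cnt '1') =
      ((l.foldl pvA_step (cnt, c110, f)).2.1,
        (l.foldl pvA_step (cnt, c110, f)).2.2 ++
          List.replicate (l.foldl pvA_step (cnt, c110, f)).1 '1')
    ∧ pvEnds0 (l.foldl pvA_step (cnt, c110, f)).2.2 := by
  induction l with
  | nil => intro f cnt c110 hf; exact ⟨rfl, hf⟩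
  | cons ch tl ih =>
    intro f cnt c110 hf
    obtain ⟨hstep, hends⟩ := pv_step_inv f cnt c110 ch hf
    simp only [List.foldl_cons, hstep]
    exact ih _ _ _ hends

theorem pv_rstrip (f : List Char) (cnt : Nat) (hf : pvEnds0 f) :
    pvB_rstrip1 (f ++ List.replicate cnt '1') = f := by
  unfold pvB_rstrip1
  rw [List.reverse_append, List.reverse_replicate, List.dropWhile_append]
  have hrep : ((List.replicate cnt '1').dropWhile (fun c => decide (c = '1'))).isEmpty = true := by
    simp
  rw [if_pos hrep]
  rcases hf with hf | ⟨g, hg⟩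
  · subst hf; simp
  · subst hg
    rw [List.reverse_append]
    simp

theorem pv_one_eq (x : String) : pvA_one x = pvB_one x := by
  unfold pvA_one pvB_one
  obtain ⟨hfold, hends⟩ := pv_fold_inv x.toList [] 0 0 (Or.inl rfl)
  simp only [List.replicate_zero, List.append_nil] at hfold
  rcases hA : x.toList.foldl pvA_step (0, 0, []) with ⟨cnt', c', f'⟩
  rw [hA] at hfold hends
  rw [hfold]
  dsimp only at hends ⊢
  rw [pv_rstrip f' cnt' hends]
  have h1 : (f' ++ List.replicate cnt' '1').length - f'.length = cnt' := by simp
  rw [h1]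
  have h2 : (f' ++ List.replicate cnt' '1').length - cnt' = f'.length := by simp
  rw [h2, List.take_left]

-- ===== VERDICT (by name: the statement is the Claim_ definition above) =====
theorem solution_spec : Claim_equal_solution := by
  intro s _
  unfold Spec_solution solution solution_alt
  exact List.map_congr_left (fun x _ => pv_one_eq x)
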